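-- pv_equiv track=rewrite | github.com/rowanjames04/Calc-is-short-for-calculator | assessment_questions/structures/structures.py | solution
-- ===== SOURCE A (Python) =====
-- def solution(structures):
--     n = len(structures)
--
--     def calculate_cost(is_ascending):
--         # Determine the minimum starting height H
--         # Target[i] = H + i (asc) or H - i (desc)
--         # Requirement: H +/- i >= structures[i] => H >= structures[i] -/+ i
--         h_start = 0
--         for i in range(n):
--             offset = i if is_ascending else -i
--             h_start = max(h_start, structures[i] - offset)
--
--         # Total cost = Sum(Target[i] - structures[i])
--         total_cost = 0
--         for i in range(n):
--             offset = i if is_ascending else -i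
--             total_cost += (h_start + offset) - structures[i]
--         return total_cost
--
--     return min(calculate_cost(True), calculate_cost(False))
-- ===== SOURCE B (Python) =====
-- def solution(structures):
--     # Online repair: maintain each orientation's cost directly; when a new
--     # element raises the required base height by delta, the i earlier elements
--     # retroactively pay i*delta.
--     m_a = c_a = m_d = c_d = 0
--     for i, x in enumerate(structures):
--         d = x - i
--         if d > m_a:
--             c_a += i * (d - m_a)
--             m_a = d
--         else:
--             c_a += m_a - d
--         e = x + i
--         if e > m_d:
--             c_d += i * (e - m_d)
--             m_d = e
--         else:
--             c_d += m_d - e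
--     return min(c_a, c_d)
-- ===== Notes on version B (the rewrite author's own statement) =====
-- stated objective: faster
-- what changed: Replaces A's two-phase per-orientation scheme (first loop finds the base height, second loop sums target-minus-height) by a single online-repair pass that maintains each orientation's cost directly, retroactively charging the i earlier elements i*delta whenever the required base height rises by delta.
import Mathlib
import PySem

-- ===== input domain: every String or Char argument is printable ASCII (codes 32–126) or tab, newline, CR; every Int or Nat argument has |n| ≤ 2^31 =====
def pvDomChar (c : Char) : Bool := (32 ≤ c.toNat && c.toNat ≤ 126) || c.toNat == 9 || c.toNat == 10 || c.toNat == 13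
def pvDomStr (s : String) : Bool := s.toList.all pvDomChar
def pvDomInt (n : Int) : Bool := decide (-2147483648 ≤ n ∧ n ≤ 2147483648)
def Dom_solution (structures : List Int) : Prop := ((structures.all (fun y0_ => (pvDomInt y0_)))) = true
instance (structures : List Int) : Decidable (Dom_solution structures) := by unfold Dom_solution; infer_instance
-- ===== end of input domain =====

-- B replaces A's two-phase scheme (find base height, then sum the costs) by one
-- online-repair pass that maintains each orientation's cost directly (objective: alternative).

-- ===== PORT A =====
-- structures[i] is always in range (i ∈ range(len)), so pyGetD with default 0 is exact.
def solution (structures : List Int) : Int :=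
  let n : Int := PySem.List.len structures
  let calculate_cost := fun (is_ascending : Bool) =>
    let h_start := (PySem.List.pyRange 0 n 1).foldl
      (fun h_start i =>
        let offset := if is_ascending then i else -i
        max h_start (PySem.List.pyGetD structures i 0 - offset)) 0
    let total_cost := (PySem.List.pyRange 0 n 1).foldl
      (fun total_cost i =>
        let offset := if is_ascending then i else -i
        total_cost + ((h_start + offset) - PySem.List.pyGetD structures i 0)) 0
    total_cost
  min (calculate_cost true) (calculate_cost false)

-- ===== PORT B =====
-- One branch of Source B's loop body: state (m, c); deficit f p; if it exceeds m the
-- p.1 earlier elements retroactively pay p.1 * (f p - m), else this element pays m - f p.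
def repairStep (f : Int × Int → Int) (mc : Int × Int) (p : Int × Int) : Int × Int :=
  if f p > mc.1 then (f p, mc.2 + p.1 * (f p - mc.1)) else (mc.1, mc.2 + mc.1 - f p)

def solution_alt (structures : List Int) : Int :=
  let st := (PySem.List.enumerate structures 0).foldl
    (fun (acc : (Int × Int) × (Int × Int)) p =>
      (repairStep (fun p => p.2 - p.1) acc.1 p,
       repairStep (fun p => p.2 + p.1) acc.2 p)) ((0, 0), (0, 0))
  min st.1.2 st.2.2

-- ===== PRECONDITION & SPEC =====
def Spec_solution (structures : List Int) (out : Int) : Prop := out = solution_alt structures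
instance (structures : List Int) (out : Int) : Decidable (Spec_solution structures out) := by unfold Spec_solution; infer_instance

-- ===== CLAIM (what is proved, stated in full; the proofs are below) =====
def Claim_equal_solution : Prop := ∀ (structures : List Int), Dom_solution structures → Spec_solution structures (solution structures)

-- ===== LEMMAS AND PROOFS =====

-- A's "for i in range(n): … structures[i] …" loop equals the same fold over enumerate(structures).
theorem bridge {α : Type} (xs : List Int) (f : α → Int → Int → α) (a : α) :
    (PySem.List.pyRange 0 (PySem.List.len xs) 1).foldl
      (fun acc i => f acc i (PySem.List.pyGetD xs i 0)) a
    = (PySem.List.enumerate xs 0).foldl (fun acc p => f acc p.1 p.2) a := by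
  rw [PySem.List.enumerate_eq_map_pyRange (d := 0), List.foldl_map]

-- B's one pair-state fold computes the two repair folds componentwise.
theorem pair_fold {σ τ : Type} (l : List (Int × Int))
    (f : σ → Int × Int → σ) (g : τ → Int × Int → τ) (a : σ) (b : τ) :
    l.foldl (fun acc p => (f acc.1 p, g acc.2 p)) (a, b)
    = (l.foldl f a, l.foldl g b) := by
  induction l generalizing a b with
  | nil => rfl
  | cons x xs ih => simp only [List.foldl_cons, ih]

-- Invariant of the online-repair loop: its cost component equals
-- (count so far) * (running max deficit) - (sum of deficits so far).
theorem repair_inv (f : Int × Int → Int) (xs : List Int) :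
    ∀ (s m c : Int),
    (PySem.List.enumerate xs s).foldl (repairStep f) (m, c)
    = ((PySem.List.enumerate xs s).foldl (fun m p => max m (f p)) m,
       c + (s + (xs.length : Int)) * ((PySem.List.enumerate xs s).foldl (fun m p => max m (f p)) m)
         - s * m - (((PySem.List.enumerate xs s).map f).sum) ) := by
  induction xs with
  | nil => intro s m c; simp [PySem.List.enumerate_nil]
  | cons x xs ih =>
      intro s m c
      simp only [PySem.List.enumerate_cons, List.foldl_cons, List.map_cons, List.sum_cons,
        List.length_cons]
      by_cases h : f (s, x) > m
      · rw [show repairStep f (m, c) (s, x) = (f (s, x), c + s * (f (s, x) - m)) by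
          simp [repairStep, h]]
        rw [show max m (f (s, x)) = f (s, x) by omega]
        rw [ih (s + 1) (f (s, x)) (c + s * (f (s, x) - m)), Prod.mk.injEq]
        exact ⟨rfl, by push_cast; ring⟩
      · rw [show repairStep f (m, c) (s, x) = (m, c + m - f (s, x)) by
          simp [repairStep, h]]
        rw [show max m (f (s, x)) = m by omega]
        rw [ih (s + 1) m (c + m - f (s, x)), Prod.mk.injEq]
        exact ⟨rfl, by push_cast; ring⟩

theorem sum_map_asc (l : List (Int × Int)) (h : Int) :
    (l.map (fun p => (h + p.1) - p.2)).sum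
    = (l.length : Int) * h + (l.map (fun p => p.1)).sum - (l.map (fun p => p.2)).sum := by
  induction l with
  | nil => simp
  | cons x xs ih => simp only [List.map_cons, List.sum_cons, List.length_cons, ih]; push_cast; ring

theorem sum_map_desc (l : List (Int × Int)) (h : Int) :
    (l.map (fun p => (h + -p.1) - p.2)).sum
    = (l.length : Int) * h - (l.map (fun p => p.1)).sum - (l.map (fun p => p.2)).sum := by
  induction l with
  | nil => simp
  | cons x xs ih => simp only [List.map_cons, List.sum_cons, List.length_cons, ih]; push_cast; ring

theorem sum_map_sub (l : List (Int × Int)) :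
    (l.map (fun p => p.2 - p.1)).sum
    = (l.map (fun p => p.2)).sum - (l.map (fun p => p.1)).sum := by
  induction l with
  | nil => simp
  | cons x xs ih => simp only [List.map_cons, List.sum_cons, ih]; ring

theorem sum_map_add (l : List (Int × Int)) :
    (l.map (fun p => p.2 + p.1)).sum
    = (l.map (fun p => p.2)).sum + (l.map (fun p => p.1)).sum := by
  induction l with
  | nil => simp
  | cons x xs ih => simp only [List.map_cons, List.sum_cons, ih]; ring

theorem main_eq (xs : List Int) : solution xs = solution_alt xs := by
  unfold solution solution_alt
  simp only [if_true, Bool.false_eq_true, if_false,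
    pair_fold, repair_inv,
    bridge xs (fun h i v => max h (v - i)) 0,
    bridge xs (fun h i v => max h (v - -i)) 0]
  rw [bridge xs (fun tc i v =>
        tc + (((PySem.List.enumerate xs 0).foldl (fun h p => max h (p.2 - p.1)) 0 + i) - v)) 0,
      bridge xs (fun tc i v =>
        tc + (((PySem.List.enumerate xs 0).foldl (fun h p => max h (p.2 - -p.1)) 0 + -i) - v)) 0,
      PySem.List.foldl_add, PySem.List.foldl_add,
      sum_map_asc, sum_map_desc, sum_map_sub, sum_map_add, PySem.List.length_enumerate]
  simp only [sub_neg_eq_add]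
  ring_nf

-- ===== VERDICT (by name: the statement is the Claim_ definition above) =====
theorem solution_spec : Claim_equal_solution := by
  intro xs _
  unfold Spec_solution
  exact main_eq xs
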